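-- pv_equiv track=rewrite | github.com/RomualdRousseau/Python | MazeNearestExit/main.py | maze_to_graph
-- ===== SOURCE A (Python) =====
-- import itertools as it
--
-- def is_exit(maze, x, y):
--     m = len(maze)
--     n = len(maze[0])
--     return x == 0 or x == (n - 1) or y == 0 or y == (m - 1)
--
-- def is_connected(maze, x1, y1, x2, y2):
--     m = len(maze)
--     n = len(maze[0])
--     e1 = maze[y1][x1]
--     e2 = maze[y2][x2]
--     if e1 != "." or e2 != ".":
--         return False
--     else:
--         return abs(x2 - x1) == 1 and y1 == y2 or abs(y2 - y1) == 1 and x1 == x2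
--
-- def maze_to_graph(maze):
--     m = len(maze)
--     n = len(maze[0])
--     return [
--         [
--             (is_connected(maze, a[1], a[0], b[1], b[0]), is_exit(maze, b[1], b[0]))
--             for b in it.product(range(m), range(n))
--         ]
--         for a in it.product(range(m), range(n))
--     ]
-- ===== SOURCE B (Python) =====
-- def maze_to_graph(maze):
--     m = len(maze)
--     n = len(maze[0])
--     N = m * n
--     openf = [maze[y][x] == "." for y in range(m) for x in range(n)]
--     exitf = [x == 0 or x == n - 1 or y == 0 or y == m - 1 for y in range(m) for x in range(n)]
--     result = []
--     for i in range(N):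
--         row = [(False, exitf[j]) for j in range(N)]
--         if openf[i]:
--             y, x = divmod(i, n)
--             for yy, xx in ((y - 1, x), (y + 1, x), (y, x - 1), (y, x + 1)):
--                 if 0 <= yy < m and 0 <= xx < n:
--                     j = yy * n + xx
--                     if openf[j]:
--                         row[j] = (True, exitf[j])
--         result.append(row)
--     return result
-- ===== Notes on version B (the rewrite author's own statement) =====
-- stated objective: alternative
-- what changed: A computes every matrix entry by an all-pairs scan calling is_connected per cell pair; B never tests pairs: it builds each row prefilled with (False, exit_flag) and then, for an open source cell, overwrites only the at-most-4 orthogonal open-neighbour entries in place.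
-- outside the precondition, e.g. on maze_to_graph([]): A raises IndexError, B raises IndexError; on maze_to_graph([['.', '.'], ['.']]): A raises IndexError, B raises IndexError
import Mathlib
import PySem

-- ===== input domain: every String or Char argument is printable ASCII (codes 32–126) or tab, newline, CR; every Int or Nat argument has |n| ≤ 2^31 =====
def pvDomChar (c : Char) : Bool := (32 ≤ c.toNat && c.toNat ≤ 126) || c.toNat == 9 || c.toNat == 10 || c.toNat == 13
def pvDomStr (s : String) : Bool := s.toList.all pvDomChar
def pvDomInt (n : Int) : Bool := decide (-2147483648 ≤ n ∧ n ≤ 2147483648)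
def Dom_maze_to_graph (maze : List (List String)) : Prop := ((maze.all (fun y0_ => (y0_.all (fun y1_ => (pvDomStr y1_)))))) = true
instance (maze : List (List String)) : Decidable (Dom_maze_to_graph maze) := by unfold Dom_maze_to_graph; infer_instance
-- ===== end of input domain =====

-- B replaces A's all-pairs is_connected scan by a table build: each row starts as
-- (false, exit_flag) everywhere and only the ≤4 orthogonal open-neighbour entries of an
-- open source cell are overwritten.

-- ===== PORT A =====
-- maze[y][x] is ported as getD with a default; exact under Pre_ (all accessed indices in range).
def pvIsExit (maze : List (List String)) (x y : Int) : Bool :=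
  let m : Int := maze.length
  let n : Int := (PySem.List.pyGetD maze 0 ([] : List String)).length
  x == 0 || x == n - 1 || y == 0 || y == m - 1

def pvIsConnected (maze : List (List String)) (x1 y1 x2 y2 : Int) : Bool :=
  let e1 := PySem.List.pyGetD (PySem.List.pyGetD maze y1 ([] : List String)) x1 ""
  let e2 := PySem.List.pyGetD (PySem.List.pyGetD maze y2 ([] : List String)) x2 ""
  if e1 != "." || e2 != "." then false
  else ((x2 - x1).natAbs == 1 && y1 == y2) || ((y2 - y1).natAbs == 1 && x1 == x2)

def maze_to_graph (maze : List (List String)) : List (List (Bool × Bool)) :=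
  let m : Int := maze.length
  let n : Int := (PySem.List.pyGetD maze 0 ([] : List String)).length
  let cells := (PySem.List.pyRange 0 m 1).flatMap
    (fun y => (PySem.List.pyRange 0 n 1).map (fun x => (y, x)))
  cells.map (fun a => cells.map (fun b =>
    (pvIsConnected maze a.2 a.1 b.2 b.1, pvIsExit maze b.2 b.1)))

-- ===== PORT B =====
-- openf[i]/exitf[j] are ported as getD (indices are in range by construction);
-- (yy*n+xx).toNat is exact because the guard ensures yy*n+xx ≥ 0.
def maze_to_graph_alt (maze : List (List String)) : List (List (Bool × Bool)) :=
  let m := maze.length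
  let n := (maze.headD []).length
  let N := m * n
  let openF : List Bool := (List.range m).flatMap
    (fun y => (List.range n).map (fun x => (maze.getD y []).getD x "" == "."))
  let exitF : List Bool := (List.range m).flatMap
    (fun y => (List.range n).map (fun x => (x == 0) || (x == n - 1) || (y == 0) || (y == m - 1)))
  (List.range N).map (fun i =>
    let row := (List.range N).map (fun j => (false, exitF.getD j false))
    if openF.getD i false then
      let y := i / n
      let x := i % n
      ([((y : Int) - 1, (x : Int)), ((y : Int) + 1, (x : Int)),
        ((y : Int), (x : Int) - 1), ((y : Int), (x : Int) + 1)] : List (Int × Int)).foldl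
        (fun r p =>
          if 0 ≤ p.1 ∧ p.1 < (m : Int) ∧ 0 ≤ p.2 ∧ p.2 < (n : Int) then
            let j := (p.1 * (n : Int) + p.2).toNat
            if openF.getD j false then r.set j (true, exitF.getD j false) else r
          else r) row
    else row)

-- ===== PRECONDITION & SPEC =====
-- Pre_ excludes exactly the inputs where Python A raises IndexError: the empty maze
-- (maze[0]) and ragged mazes whose later rows are shorter than row 0 (maze[y][x]).
def Pre_maze_to_graph (maze : List (List String)) : Prop :=
  maze ≠ [] ∧ ∀ row ∈ maze, (maze.headD []).length ≤ row.length
instance (maze : List (List String)) : Decidable (Pre_maze_to_graph maze) := by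
  unfold Pre_maze_to_graph; infer_instance
def pvWitness_maze_to_graph : List (List String) := [[".", "#"], [".", "."]]

def Spec_maze_to_graph (maze : List (List String)) (out : List (List (Bool × Bool))) : Prop := out = maze_to_graph_alt maze
instance (maze : List (List String)) (out : List (List (Bool × Bool))) : Decidable (Spec_maze_to_graph maze out) := by unfold Spec_maze_to_graph; infer_instance

-- ===== CLAIM (what is proved, stated in full; the proofs are below) =====
def Claim_equal_maze_to_graph : Prop := ∀ (maze : List (List String)), Dom_maze_to_graph maze → Pre_maze_to_graph maze → Spec_maze_to_graph maze (maze_to_graph maze)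

-- ===== LEMMAS AND PROOFS =====

-- proof-only bridge: the matrix written as one closed-form map over flat indices
def pvClosed (maze : List (List String)) : List (List (Bool × Bool)) :=
  let m := maze.length
  let n := (maze.headD []).length
  let openF : List Bool := (List.range m).flatMap
    (fun y => (List.range n).map (fun x => (maze.getD y []).getD x "" == "."))
  let exitF : List Bool := (List.range m).flatMap
    (fun y => (List.range n).map (fun x => (x == 0) || (x == n - 1) || (y == 0) || (y == m - 1)))
  let N := m * n
  (List.range N).map (fun i => (List.range N).map (fun j =>
    (openF.getD i false && openF.getD j false &&
       ((((i : Int) - (j : Int)).natAbs == n) ||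
        ((((i : Int) - (j : Int)).natAbs == 1) && (i / n == j / n))),
     exitF.getD j false)))

-- flattening a y/x double loop into one loop over flat indices
theorem pv_flat_range {α : Type} (m n : Nat) (f : Nat → Nat → α) :
    (List.range m).flatMap (fun y => (List.range n).map (f y))
      = (List.range (m*n)).map (fun k => f (k/n) (k%n)) := by
  rcases Nat.eq_zero_or_pos n with hn | hn
  · subst hn; simp
  · induction m with
    | zero => simp
    | succ m ih =>
      rw [List.range_succ, List.flatMap_append, ih, Nat.succ_mul, List.range_add,
          List.map_append, List.map_map]
      congr 1
      · simp
        intro a ha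
        have h1 : (m*n + a)/n = m := by
          rw [Nat.mul_comm m n, Nat.mul_add_div hn, Nat.div_eq_of_lt ha]; omega
        have h2 : a % n = a := Nat.mod_eq_of_lt ha
        rw [h1, h2]

-- coordinate adjacency = flat-index adjacency
theorem pv_adj_iff (n y1 x1 y2 x2 : Nat) (hn : 0 < n) (h1 : x1 < n) (h2 : x2 < n) :
    ((((x2:Int) - x1).natAbs = 1 ∧ (y1:Int) = y2) ∨ (((y2:Int) - y1).natAbs = 1 ∧ (x1:Int) = x2))
    ↔ ((((y1*n+x1 : Nat):Int) - ((y2*n+x2 : Nat):Int)).natAbs = n ∨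
       ((((y1*n+x1 : Nat):Int) - ((y2*n+x2 : Nat):Int)).natAbs = 1 ∧ y1 = y2)) := by
  push_cast
  set d : Int := (y1:Int) - y2 with hd
  have e : ((y1:Int)*n + x1 - (↑y2*↑n + ↑x2)) = d*n + (↑x1 - ↑x2) := by rw [hd]; ring
  rw [e]
  have hyd : ((y2:Int) - y1) = -d := by rw [hd]; ring
  by_cases h0 : d = 0
  · have : d * n = 0 := by rw [h0]; ring
    rw [hyd] at *; omega
  · by_cases hp1 : d = 1
    · have : d * n = n := by rw [hp1]; ring
      rw [hyd] at *; omega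
    · by_cases hm1 : d = -1
      · have : d * n = -(n:Int) := by rw [hm1]; ring
        rw [hyd] at *; omega
      · have h2d : 2 ≤ d.natAbs := by omega
        have hbig : 2*n ≤ (d*n).natAbs := by
          rw [Int.natAbs_mul, Int.natAbs_natCast]
          exact Nat.mul_le_mul_right n h2d
        rw [hyd] at *
        generalize d*n = p at *
        omega

theorem pv_getD_zero_headD {α : Type} (xs : List α) (d : α) : xs.getD 0 d = xs.headD d := by
  cases xs <;> rfl

theorem pv_div (n y x : Nat) (hn : 0 < n) (hx : x < n) : (y*n+x)/n = y := by
  rw [Nat.mul_comm y n, Nat.mul_add_div hn, Nat.div_eq_of_lt hx]; omega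

-- the flat-index adjacency Boolean, characterised by the four neighbour candidates
theorem pv_adjB_iff' (n y x y2 x2 : Nat) (hn : 0 < n) (hx : x < n) (hx2 : x2 < n) :
    (((((y*n+x : Nat):Int) - ((y2*n+x2 : Nat):Int)).natAbs == n)
      || (((((y*n+x : Nat):Int) - ((y2*n+x2 : Nat):Int)).natAbs == 1) && (y == y2))) = true
    ↔ ((1 ≤ y ∧ y2 = y - 1 ∧ x2 = x) ∨ (y2 = y + 1 ∧ x2 = x)
        ∨ (1 ≤ x ∧ y2 = y ∧ x2 = x - 1) ∨ (y2 = y ∧ x2 = x + 1)) := by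
  simp only [Bool.or_eq_true, Bool.and_eq_true, beq_iff_eq]
  rw [← pv_adj_iff n y x y2 x2 hn hx hx2]
  omega

theorem pv_adjB_iff (n y x y2 x2 : Nat) (hn : 0 < n) (hx : x < n) (hx2 : x2 < n) :
    (((((y*n+x : Nat):Int) - ((y2*n+x2 : Nat):Int)).natAbs == n)
      || (((((y*n+x : Nat):Int) - ((y2*n+x2 : Nat):Int)).natAbs == 1) && (y == (y2*n+x2)/n))) = true
    ↔ ((1 ≤ y ∧ y2 = y - 1 ∧ x2 = x) ∨ (y2 = y + 1 ∧ x2 = x)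
        ∨ (1 ≤ x ∧ y2 = y ∧ x2 = x - 1) ∨ (y2 = y ∧ x2 = x + 1)) := by
  rw [pv_div n y2 x2 hn hx2]
  exact pv_adjB_iff' n y x y2 x2 hn hx hx2

-- collapse 'if P then (if o then s else r) else r'
theorem pv_if_if {α : Type} (P : Prop) [Decidable P] (o : Bool) (s r : α) :
    (if P then (if o then s else r) else r) = if P ∧ o = true then s else r := by
  by_cases hP : P <;> by_cases ho : o = true <;> simp [hP, ho]

-- one conditional set on a map-over-range row, as a pointwise map
theorem pv_step_set {α : Type} (N : Nat) (h : Nat → α) (P : Prop) [Decidable P] (j : Nat) (v : α) :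
    (if P then ((List.range N).map h).set j v else (List.range N).map h)
      = (List.range N).map (fun k => if P ∧ k = j then v else h k) := by
  by_cases hP : P
  · rw [if_pos hP]
    apply List.ext_getElem
    · simp
    · intro k h1 h2
      simp only [List.length_set, List.length_map, List.length_range] at h1
      simp only [List.getElem_set, List.getElem_map, List.getElem_range]
      split_ifs with hjk hc hc
      · rfl
      · exact absurd ⟨hP, hjk.symm⟩ hc
      · exact absurd hc.2.symm hjk
      · rfl
  · simp [hP]

theorem pv_toNat_cast (n u v : Nat) : (((u : Int)) * (n : Int) + (v : Int)).toNat = u*n+v := by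
  rw [show ((u : Int)) * (n : Int) + (v : Int) = ((u*n+v : Nat) : Int) by push_cast; ring,
      Int.toNat_natCast]

-- A equals the closed form (unconditionally on the ports)
theorem pvA_closed (maze : List (List String)) : maze_to_graph maze = pvClosed maze := by
  have hhead : PySem.List.pyGetD maze 0 ([] : List String) = maze.headD [] := by
    rw [PySem.List.pyGetD_zero, pv_getD_zero_headD]
  simp only [maze_to_graph, pvClosed, hhead]
  set m := maze.length with hm
  set n := (maze.headD []).length with hn
  rw [PySem.List.pyRange_one, PySem.List.pyRange_one]
  simp only [Int.sub_zero, Int.toNat_natCast, zero_add, List.flatMap_map, List.map_map]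
  simp only [Function.comp_def]
  rw [pv_flat_range m n (fun y x => (((y:Int)), ((x:Int)))),
      pv_flat_range m n (fun y x => (maze.getD y []).getD x "" == "."),
      pv_flat_range m n (fun y x => (x == 0) || (x == n - 1) || (y == 0) || (y == m - 1))]
  simp only [List.map_map]
  apply List.map_congr_left
  intro i hi
  rw [List.mem_range] at hi
  apply List.map_congr_left
  intro j hj
  rw [List.mem_range] at hj
  have hn0 : 0 < n := by
    rcases Nat.eq_zero_or_pos n with h | h
    · rw [h, Nat.mul_zero] at hi; omega
    · exact h
  have hm0 : 0 < m := by
    rcases Nat.eq_zero_or_pos m with h | h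
    · rw [h, Nat.zero_mul] at hi; omega
    · exact h
  rw [PySem.List.getD_map_range _ _ _ _ hi, PySem.List.getD_map_range _ _ _ _ hj,
      PySem.List.getD_map_range _ _ _ _ hj]
  simp only [Function.comp_def]
  have hiN : i/n*n + i%n = i := by rw [Nat.mul_comm]; exact Nat.div_add_mod i n
  have hjN : j/n*n + j%n = j := by rw [Nat.mul_comm]; exact Nat.div_add_mod j n
  refine Prod.ext ?_ ?_
  · -- connectivity component
    simp only [pvIsConnected, PySem.List.pyGetD_natCast]
    by_cases h1 : (maze.getD (i / n) []).getD (i % n) "" = "."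
    · by_cases h2 : (maze.getD (j / n) []).getD (j % n) "" = "."
      · -- both open: coordinate adjacency = flat-index adjacency
        have key := pv_adj_iff n (i/n) (i%n) (j/n) (j%n) hn0
          (Nat.mod_lt _ hn0) (Nat.mod_lt _ hn0)
        rw [hiN, hjN] at key
        rw [h1, h2]
        simp only [bne_self_eq_false, Bool.or_self, Bool.false_eq_true, if_false,
          beq_self_eq_true, Bool.true_and]
        rw [Bool.eq_iff_iff]
        simp only [Bool.or_eq_true, Bool.and_eq_true, beq_iff_eq]
        exact key
      · simp [h2, -List.getD_eq_getElem?_getD]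
    · simp [h1, -List.getD_eq_getElem?_getD]
  · -- exit component
    simp only [pvIsExit, hhead]
    rw [Bool.eq_iff_iff]
    simp only [Bool.or_eq_true, beq_iff_eq, ← hm, ← hn]
    generalize j % n = b
    generalize j / n = a
    omega

-- B equals the closed form
theorem pvB_closed (maze : List (List String)) : maze_to_graph_alt maze = pvClosed maze := by
  simp only [maze_to_graph_alt, pvClosed]
  set m := maze.length with hm
  set n := (maze.headD []).length with hn
  set oF : List Bool := (List.range m).flatMap
    (fun y => (List.range n).map (fun x => (maze.getD y []).getD x "" == ".")) with hoF
  set eF : List Bool := (List.range m).flatMap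
    (fun y => (List.range n).map (fun x => (x == 0) || (x == n - 1) || (y == 0) || (y == m - 1))) with heF
  apply List.map_congr_left
  intro i hi
  rw [List.mem_range] at hi
  have hn0 : 0 < n := by
    rcases Nat.eq_zero_or_pos n with h | h
    · rw [h, Nat.mul_zero] at hi; omega
    · exact h
  have hm0 : 0 < m := by
    rcases Nat.eq_zero_or_pos m with h | h
    · rw [h, Nat.zero_mul] at hi; omega
    · exact h
  by_cases ho : oF.getD i false = true
  · rw [if_pos ho]
    simp only [List.foldl_cons, List.foldl_nil]
    rw [pv_if_if, pv_if_if, pv_if_if, pv_if_if,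
        pv_step_set, pv_step_set, pv_step_set, pv_step_set]
    apply List.map_congr_left
    intro k hk
    rw [List.mem_range] at hk
    set y := i / n with hy
    set x := i % n with hx
    have hyx : y*n + x = i := by rw [hy, hx, Nat.mul_comm]; exact Nat.div_add_mod i n
    have hxn : x < n := Nat.mod_lt _ hn0
    have hym : y < m := by rw [hy]; exact Nat.div_lt_of_lt_mul (by rw [Nat.mul_comm n m]; omega)
    clear_value y x
    split_ifs with h4 h3 h2 h1
    · -- right neighbour (y, x+1)
      obtain ⟨⟨hg, ho2⟩, hkj⟩ := h4
      have hj : ((y : Int) * (n : Int) + ((x : Int) + 1)).toNat = y*n+(x+1) := by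
        rw [show (y : Int) * (n : Int) + ((x : Int) + 1) = ((y : Int)) * (n : Int) + ((x+1 : Nat) : Int) by push_cast; ring, pv_toNat_cast]
      rw [hj] at hkj ho2
      subst hkj
      rw [hj]
      simp only [ho, ho2, Bool.true_and, Bool.and_true, Prod.mk.injEq]
      refine ⟨?_, by trivial⟩
      rw [← hyx]
      exact ((pv_adjB_iff n y x y (x+1) hn0 hxn (by omega : x+1 < n)).mpr (by omega)).symm
    · -- left neighbour (y, x-1)
      obtain ⟨⟨hg, ho2⟩, hkj⟩ := h3
      have hx1 : 1 ≤ x := by omega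
      have hj : ((y : Int) * (n : Int) + ((x : Int) - 1)).toNat = y*n+(x-1) := by
        rw [show (y : Int) * (n : Int) + ((x : Int) - 1) = ((y : Int)) * (n : Int) + ((x-1 : Nat) : Int) by push_cast [hx1]; ring, pv_toNat_cast]
      rw [hj] at hkj ho2
      subst hkj
      rw [hj]
      simp only [ho, ho2, Bool.true_and, Bool.and_true, Prod.mk.injEq]
      refine ⟨?_, by trivial⟩
      rw [← hyx]
      exact ((pv_adjB_iff n y x y (x-1) hn0 hxn (by omega)).mpr (by omega)).symm
    · -- down neighbour (y+1, x)
      obtain ⟨⟨hg, ho2⟩, hkj⟩ := h2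
      have hj : (((y : Int) + 1) * (n : Int) + (x : Int)).toNat = (y+1)*n+x := by
        rw [show ((y : Int) + 1) * (n : Int) + (x : Int) = (((y+1 : Nat)) : Int) * (n : Int) + ((x : Nat) : Int) by push_cast; ring, pv_toNat_cast]
      rw [hj] at hkj ho2
      subst hkj
      rw [hj]
      simp only [ho, ho2, Bool.true_and, Bool.and_true, Prod.mk.injEq]
      refine ⟨?_, by trivial⟩
      rw [← hyx]
      exact ((pv_adjB_iff n y x (y+1) x hn0 hxn hxn).mpr (by omega)).symm
    · -- up neighbour (y-1, x)
      obtain ⟨⟨hg, ho2⟩, hkj⟩ := h1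
      have hy1 : 1 ≤ y := by omega
      have hj : (((y : Int) - 1) * (n : Int) + (x : Int)).toNat = (y-1)*n+x := by
        rw [show ((y : Int) - 1) * (n : Int) + (x : Int) = (((y-1 : Nat)) : Int) * (n : Int) + ((x : Nat) : Int) by push_cast [hy1]; ring, pv_toNat_cast]
      rw [hj] at hkj ho2
      subst hkj
      rw [hj]
      simp only [ho, ho2, Bool.true_and, Bool.and_true, Prod.mk.injEq]
      refine ⟨?_, by trivial⟩
      rw [← hyx]
      exact ((pv_adjB_iff n y x (y-1) x hn0 hxn hxn).mpr (by omega)).symm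
    · -- no neighbour hits k
      set y2 := k / n with hy2
      set x2 := k % n with hx2
      have hk2 : y2*n + x2 = k := by rw [hy2, hx2, Nat.mul_comm]; exact Nat.div_add_mod k n
      have hx2n : x2 < n := Nat.mod_lt _ hn0
      have hy2m : y2 < m := by rw [hy2]; exact Nat.div_lt_of_lt_mul (by rw [Nat.mul_comm n m]; omega)
      clear_value y2 x2
      simp only [ho, Bool.true_and, Prod.mk.injEq]
      refine ⟨?_, by trivial⟩
      cases hok : oF.getD k false with
      | false => simp
      | true =>
        simp only [Bool.true_and]
        symm
        rw [← hyx, ← hk2]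
        rw [Bool.eq_false_iff, Ne, pv_adjB_iff' n y x y2 x2 hn0 hxn hx2n]
        rintro (⟨c1, c2, c3⟩ | ⟨c2, c3⟩ | ⟨c1, c2, c3⟩ | ⟨c2, c3⟩)
        · -- up candidate would have hit
          apply h1
          have hj : (((y : Int) - 1) * (n : Int) + (x : Int)).toNat = (y-1)*n+x := by
            rw [show ((y : Int) - 1) * (n : Int) + (x : Int) = (((y-1 : Nat)) : Int) * (n : Int) + ((x : Nat) : Int) by push_cast [c1]; ring, pv_toNat_cast]
          have hkj : k = (((y : Int) - 1) * (n : Int) + (x : Int)).toNat := by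
            rw [hj, ← hk2, c2, c3]
          refine ⟨⟨⟨by omega, by omega, by omega, by omega⟩, ?_⟩, hkj⟩
          rw [← hkj]; exact hok
        · apply h2
          have hj : (((y : Int) + 1) * (n : Int) + (x : Int)).toNat = (y+1)*n+x := by
            rw [show ((y : Int) + 1) * (n : Int) + (x : Int) = (((y+1 : Nat)) : Int) * (n : Int) + ((x : Nat) : Int) by push_cast; ring, pv_toNat_cast]
          have hkj : k = (((y : Int) + 1) * (n : Int) + (x : Int)).toNat := by
            rw [hj, ← hk2, c2, c3]
          refine ⟨⟨⟨by omega, by omega, by omega, by omega⟩, ?_⟩, hkj⟩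
          rw [← hkj]; exact hok
        · apply h3
          have hj : ((y : Int) * (n : Int) + ((x : Int) - 1)).toNat = y*n+(x-1) := by
            rw [show (y : Int) * (n : Int) + ((x : Int) - 1) = ((y : Int)) * (n : Int) + ((x-1 : Nat) : Int) by push_cast [c1]; ring, pv_toNat_cast]
          have hkj : k = ((y : Int) * (n : Int) + ((x : Int) - 1)).toNat := by
            rw [hj, ← hk2, c2, c3]
          refine ⟨⟨⟨by omega, by omega, by omega, by omega⟩, ?_⟩, hkj⟩
          rw [← hkj]; exact hok
        · apply h4
          have hxn2 : x + 1 < n := by omega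
          have hj : ((y : Int) * (n : Int) + ((x : Int) + 1)).toNat = y*n+(x+1) := by
            rw [show (y : Int) * (n : Int) + ((x : Int) + 1) = ((y : Int)) * (n : Int) + ((x+1 : Nat) : Int) by push_cast; ring, pv_toNat_cast]
          have hkj : k = ((y : Int) * (n : Int) + ((x : Int) + 1)).toNat := by
            rw [hj, ← hk2, c2, c3]
          refine ⟨⟨⟨by omega, by omega, by omega, by omega⟩, ?_⟩, hkj⟩
          rw [← hkj]; exact hok
  · rw [if_neg ho]
    rw [Bool.not_eq_true] at ho
    rw [List.getD_eq_getElem?_getD] at ho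
    apply List.map_congr_left
    intro k hk
    simp [ho]

-- ===== VERDICT (by name: the statement is the Claim_ definition above) =====
theorem maze_to_graph_spec : Claim_equal_maze_to_graph := by
  intro maze _ _
  unfold Spec_maze_to_graph
  rw [pvA_closed, pvB_closed]
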